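-- pv_equiv track=rewrite | github.com/nodacrystal/oogiri-ai | dajare_engine.py | find_consecutive_matches
-- ===== SOURCE A (Python) =====
-- def find_consecutive_matches(pattern_a: list, pattern_b: list) -> list:
--     """
--     2つの母音パターン間の連続一致を見つける。
--     アルゴリズム仕様: 2文字以上連続しない一致はカウント対象外。
--     短い方を基準に、全てのオフセットでスライドして最良の一致を探す。
--
--     Returns: 一致位置のリスト [(a_idx, b_idx), ...]
--     """
--     if not pattern_a or not pattern_b:
--         return []
--
--     best_matches = []
--     len_a = len(pattern_a)
--     len_b = len(pattern_b)
--
--     # pattern_aをpattern_bの各位置にアラインして比較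
--     for offset in range(-(len_a - 1), len_b):
--         current_run = []
--         matches_in_this_alignment = []
--
--         for i in range(len_a):
--             j = i + offset
--             if 0 <= j < len_b:
--                 if pattern_a[i] == pattern_b[j]:
--                     current_run.append((i, j))
--                 else:
--                     if len(current_run) >= 2:
--                         matches_in_this_alignment.extend(current_run)
--                     current_run = []
--             else:
--                 if len(current_run) >= 2:
--                     matches_in_this_alignment.extend(current_run)
--                 current_run = []
--
--         # 最後のランを処理
--         if len(current_run) >= 2:
--             matches_in_this_alignment.extend(current_run)
--
--         if len(matches_in_this_alignment) > len(best_matches):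
--             best_matches = matches_in_this_alignment
--
--     return best_matches
-- ===== SOURCE B (Python) =====
-- def find_consecutive_matches(pattern_a: list, pattern_b: list) -> list:
--     """Index pattern_b by value, bucket the matching position pairs by diagonal,
--     then score only the occupied diagonals from their sparse match lists."""
--     if not pattern_a or not pattern_b:
--         return []
--     pos = {}
--     for j, v in enumerate(pattern_b):
--         pos.setdefault(v, []).append(j)
--     diag = {}
--     for i, v in enumerate(pattern_a):
--         for j in pos.get(v, []):
--             diag.setdefault(j - i, []).append(i)
--     best = []
--     for d in sorted(diag):
--         idxs = diag[d]  # strictly increasing match positions on diagonal d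
--         matches = []
--         start = end = idxs[0]
--         for i in idxs[1:]:
--             if i == end + 1:
--                 end = i
--             else:
--                 if end > start:
--                     matches.extend((k, k + d) for k in range(start, end + 1))
--                 start = end = i
--         if end > start:
--             matches.extend((k, k + d) for k in range(start, end + 1))
--         if len(matches) > len(best):
--             best = matches
--     return best
-- ===== Notes on version B (the rewrite author's own statement) =====
-- stated objective: faster
-- what changed: B replaces A's scan of every diagonal over all len_a positions by a value index of pattern_b (dict value -> positions) used to bucket the actual matching position pairs by diagonal, then scores only the occupied diagonals by grouping each sparse ascending index list into consecutive runs.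
import Mathlib
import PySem

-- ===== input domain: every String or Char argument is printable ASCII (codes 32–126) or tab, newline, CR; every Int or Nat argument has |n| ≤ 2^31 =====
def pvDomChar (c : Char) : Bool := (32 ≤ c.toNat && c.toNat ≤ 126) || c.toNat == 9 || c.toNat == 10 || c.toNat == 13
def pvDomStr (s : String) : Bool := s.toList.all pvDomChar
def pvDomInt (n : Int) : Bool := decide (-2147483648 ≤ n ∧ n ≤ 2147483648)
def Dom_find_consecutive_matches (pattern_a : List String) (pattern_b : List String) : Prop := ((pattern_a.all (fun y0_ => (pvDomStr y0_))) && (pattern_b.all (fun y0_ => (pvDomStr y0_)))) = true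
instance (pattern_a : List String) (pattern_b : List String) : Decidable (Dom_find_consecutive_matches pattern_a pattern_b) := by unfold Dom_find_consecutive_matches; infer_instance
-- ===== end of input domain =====

-- B indexes pattern_b by value, buckets the matching position pairs by diagonal in a dict, and
-- scores only the occupied diagonals from their sparse match lists; objective: faster on inputs
-- where value matches are sparse (A scans every diagonal over all positions).

-- ===== PORT A =====
-- flush: Python's `if len(current_run) >= 2: matches.extend(current_run)`
def pvFlushA (run acc : List (Int × Int)) : List (Int × Int) :=
  if 2 ≤ run.length then acc ++ run else acc

-- one iteration of A's inner `for i in range(len_a)`; i < len pa always, so getD is exact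
def pvStepA (pa pb : List String) (offset : Int) (st : List (Int × Int) × List (Int × Int))
    (i : Nat) : List (Int × Int) × List (Int × Int) :=
  let j : Int := (i : Int) + offset
  if 0 ≤ j ∧ j < (pb.length : Int) then
    if pa.getD i "" = pb.getD j.toNat "" then (st.1 ++ [((i : Int), j)], st.2)
    else ([], pvFlushA st.1 st.2)
  else ([], pvFlushA st.1 st.2)

def pvInnerA (pa pb : List String) (offset : Int) : List (Int × Int) :=
  let st := (List.range pa.length).foldl (pvStepA pa pb offset) ([], [])
  pvFlushA st.1 st.2

def find_consecutive_matches (pattern_a : List String) (pattern_b : List String) :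
    List (Int × Int) :=
  if pattern_a = [] ∨ pattern_b = [] then []
  else
    (PySem.List.pyRange (-((pattern_a.length : Int) - 1)) (pattern_b.length : Int)).foldl
      (fun best offset =>
        let m := pvInnerA pattern_a pattern_b offset
        if m.length > best.length then m else best) []

-- ===== PORT B =====
-- Python's `if end > start: matches.extend((k, k + d) for k in range(start, end + 1))`
def pvEmit (d st en : Int) (m : List (Int × Int)) : List (Int × Int) :=
  if en > st then m ++ (PySem.List.pyRange st (en + 1)).map (fun k => (k, k + d)) else m

-- one iteration of B's `for i in idxs[1:]`; state = (start, end, matches)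
def pvStepG (d : Int) (st : Int × Int × List (Int × Int)) (i : Int) : Int × Int × List (Int × Int) :=
  if i = st.2.1 + 1 then (st.1, i, st.2.2)
  else (i, i, pvEmit d st.1 st.2.1 st.2.2)

-- B's per-diagonal grouping of the sparse index list (idxs is never [] in Source B)
def pvGroupB (d : Int) (idxs : List Int) : List (Int × Int) :=
  match idxs with
  | [] => []
  | h :: t =>
    let st := t.foldl (pvStepG d) (h, h, [])
    pvEmit d st.1 st.2.1 st.2.2

-- `pos.setdefault(v, []).append(j)` over `enumerate(pattern_b)`
def pvPos (pb : List String) : PySem.Dict String (List Int) :=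
  (PySem.List.enumerate pb).foldl
    (fun dct jv => dct.modify jv.2 [] (fun l => l ++ [jv.1])) PySem.Dict.empty

-- `diag.setdefault(j - i, []).append(i)` over `enumerate(pattern_a)` and `pos.get(v, [])`
def pvDiag (pa pb : List String) : PySem.Dict Int (List Int) :=
  (PySem.List.enumerate pa).foldl
    (fun dd iv =>
      ((pvPos pb).getD iv.2 []).foldl
        (fun dd j => dd.modify (j - iv.1) [] (fun l => l ++ [iv.1])) dd)
    PySem.Dict.empty

def find_consecutive_matches_alt (pattern_a : List String) (pattern_b : List String) :
    List (Int × Int) :=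
  if pattern_a = [] ∨ pattern_b = [] then []
  else
    let diag := pvDiag pattern_a pattern_b
    (PySem.List.sorted diag.keys (fun x => x)).foldl
      (fun best d =>
        let m := pvGroupB d ((diag.get? d).getD [])
        if m.length > best.length then m else best) []

-- ===== PRECONDITION & SPEC =====
def Spec_find_consecutive_matches (pattern_a : List String) (pattern_b : List String) (out : List (Int × Int)) : Prop := out = find_consecutive_matches_alt pattern_a pattern_b
instance (pattern_a : List String) (pattern_b : List String) (out : List (Int × Int)) : Decidable (Spec_find_consecutive_matches pattern_a pattern_b out) := by unfold Spec_find_consecutive_matches; infer_instance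

-- ===== CLAIM (what is proved, stated in full; the proofs are below) =====
def Claim_equal_find_consecutive_matches : Prop := ∀ (pattern_a : List String) (pattern_b : List String), Dom_find_consecutive_matches pattern_a pattern_b → Spec_find_consecutive_matches pattern_a pattern_b (find_consecutive_matches pattern_a pattern_b)

-- ===== LEMMAS AND PROOFS =====

-- i is a matching position on diagonal d (in-window and equal values)
def pvCond (pa pb : List String) (d : Int) (i : Nat) : Bool :=
  decide (0 ≤ (i : Int) + d ∧ (i : Int) + d < (pb.length : Int)) &&
    (pa.getD i "" == pb.getD ((i : Int) + d).toNat "")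

-- the ascending matching positions of segment [s, s+n) on diagonal d, as Python ints
def pvSeg (pa pb : List String) (d : Int) (s n : Nat) : List Int :=
  ((List.range' s n).filter (pvCond pa pb d)).map (fun (i : Nat) => ((i : Int)))

-- all matching positions on diagonal d
def pvMatch (pa pb : List String) (d : Int) : List Int :=
  ((List.range pa.length).filter (pvCond pa pb d)).map (fun (i : Nat) => ((i : Int)))

-- A's current_run for the consecutive matching block [r, s)
def pvRunInt (d r s : Int) : List (Int × Int) :=
  (PySem.List.pyRange r s).map (fun k => (k, k + d))

-- A's inner loop from position s with n positions left, then the final flush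
def pvOutA (pa pb : List String) (d : Int) (n s : Nat) (run acc : List (Int × Int)) :
    List (Int × Int) :=
  pvFlushA ((List.range' s n).foldl (pvStepA pa pb d) (run, acc)).1
    ((List.range' s n).foldl (pvStepA pa pb d) (run, acc)).2

-- B's final emit applied to a grouping state
def pvFin (d : Int) (st : Int × Int × List (Int × Int)) : List (Int × Int) :=
  pvEmit d st.1 st.2.1 st.2.2

-- the flat (diagonal, position) list underlying the diag dict
def pvFlat (pa pb : List String) : List (Int × Int) :=
  (List.range pa.length).flatMap
    (fun i => ((pvPos pb).getD (pa.getD i "") []).map (fun j => (j - (i : Int), (i : Int))))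

theorem pv_enum_eq (xs : List String) : ∀ (k : Int),
    PySem.List.enumerate xs k = (List.range xs.length).map (fun (i : Nat) => (k + (i : Int), xs.getD i "")) := by
  induction xs with
  | nil => intro k; simp [PySem.List.enumerate]
  | cons x t ih =>
    intro k
    rw [List.length_cons, List.range_succ_eq_map]
    simp only [PySem.List.enumerate, List.map_cons, List.map_map]
    rw [ih (k + 1)]
    congr 1
    · simp
    · apply List.map_congr_left
      intro i _
      simp only [Function.comp_def, List.getD_cons_succ, Prod.mk.injEq]
      exact ⟨by push_cast; ring, trivial⟩

theorem pv_posList_eq (pb : List String) (v : String) :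
    (pvPos pb).getD v [] =
      ((List.range pb.length).filter (fun j => pb.getD j "" == v)).map (fun (j : Nat) => ((j : Int))) := by
  unfold pvPos
  rw [← List.foldl_map (f := fun (jv : Int × String) => (jv.2, jv.1))
      (g := fun (dct : PySem.Dict String (List Int)) (p : String × Int) =>
        dct.modify p.1 [] (fun l => l ++ [p.2]))]
  rw [PySem.Dict.getD_foldl_modify_append]
  simp only [PySem.Dict.getD_empty, List.nil_append]
  rw [pv_enum_eq pb 0, List.map_map, List.filter_map, List.map_map]
  simp only [Function.comp_def]
  rw [List.filter_congr (q := fun j => pb.getD j "" == v) (fun j _ => rfl)]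
  exact List.map_congr_left (fun j _ => by simp)

theorem pv_mem_posList (pb : List String) (v : String) (c : Int) :
    c ∈ (pvPos pb).getD v [] ↔ ∃ j : Nat, j < pb.length ∧ pb.getD j "" = v ∧ c = (j : Int) := by
  rw [pv_posList_eq]
  simp only [List.mem_map, List.mem_filter, List.mem_range, beq_iff_eq]
  constructor
  · rintro ⟨j, ⟨hj, hv⟩, rfl⟩; exact ⟨j, hj, hv, rfl⟩
  · rintro ⟨j, hj, hv, rfl⟩; exact ⟨j, ⟨hj, hv⟩, rfl⟩

theorem pv_nodup_posList (pb : List String) (v : String) : ((pvPos pb).getD v []).Nodup := by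
  rw [pv_posList_eq]
  exact (List.nodup_range.filter _).map (fun a b hab => by exact_mod_cast hab)

theorem pv_filter_beq_of_nodup : ∀ (l : List Int), l.Nodup → ∀ (c : Int),
    l.filter (fun x => x == c) = if c ∈ l then [c] else [] := by
  intro l
  induction l with
  | nil => intro _ c; simp
  | cons a t ih =>
    intro h c
    rcases List.nodup_cons.mp h with ⟨ha, ht⟩
    rw [List.filter_cons]
    by_cases hac : a = c
    · subst hac
      simp [ih ht a, ha]
    · have hb : (a == c) = false := by simp [hac]
      simp [hb, ih ht c, Ne.symm hac]

theorem pv_diag_eq_fold (pa pb : List String) :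
    pvDiag pa pb = (pvFlat pa pb).foldl
      (fun dd p => dd.modify p.1 [] (fun l => l ++ [p.2])) PySem.Dict.empty := by
  unfold pvDiag pvFlat
  rw [pv_enum_eq pa 0, List.foldl_map, List.foldl_flatMap]
  apply PySem.List.foldl_congr_mem'
  intro i _ dd
  rw [List.foldl_map]
  simp

theorem pv_diag_getD_filter (pa pb : List String) (d : Int) :
    (pvDiag pa pb).getD d [] =
      ((pvFlat pa pb).filter (fun p => p.1 == d)).map (fun p => p.2) := by
  rw [pv_diag_eq_fold, PySem.Dict.getD_foldl_modify_append]
  simp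

theorem pv_cond_iff (pa pb : List String) (d : Int) (i : Nat) :
    pvCond pa pb d i = true ↔ ((i : Int) + d) ∈ (pvPos pb).getD (pa.getD i "") [] := by
  rw [pv_mem_posList]
  unfold pvCond
  simp only [Bool.and_eq_true, decide_eq_true_eq, beq_iff_eq]
  constructor
  · rintro ⟨⟨h0, hlb⟩, heq⟩
    exact ⟨((i : Int) + d).toNat, by omega, heq.symm, by omega⟩
  · rintro ⟨j, hj, hv, hji⟩
    refine ⟨⟨by omega, by omega⟩, ?_⟩
    have hjn : ((i : Int) + d).toNat = j := by omega
    rw [hjn, hv]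

theorem pv_flatMap_if (p : Nat → Bool) (f : Nat → Int) (g : Nat → List Int) :
    ∀ (l : List Nat), (∀ i ∈ l, g i = if p i then [f i] else []) →
      l.flatMap g = (l.filter p).map f := by
  intro l
  induction l with
  | nil => intro _; simp
  | cons a t ih =>
    intro hg
    rw [List.flatMap_cons, List.filter_cons, ih (fun i hi => hg i (List.mem_cons_of_mem a hi)),
      hg a List.mem_cons_self]
    by_cases hp : p a = true
    · simp [hp]
    · simp [Bool.eq_false_iff.mpr hp]

theorem pv_diag_getD (pa pb : List String) (d : Int) :
    (pvDiag pa pb).getD d [] = pvMatch pa pb d := by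
  rw [pv_diag_getD_filter]
  unfold pvFlat pvMatch
  rw [List.filter_flatMap, List.map_flatMap]
  apply pv_flatMap_if
  intro i _
  rw [List.filter_map, List.map_map]
  rw [List.filter_congr (q := fun j => j == (i : Int) + d)
    (by intro j _; rw [Bool.eq_iff_iff]; simp only [Function.comp_def, beq_iff_eq]; omega)]
  rw [pv_filter_beq_of_nodup _ (pv_nodup_posList pb _) ((i : Int) + d)]
  by_cases hm : ((i : Int) + d) ∈ (pvPos pb).getD (pa.getD i "") []
  · rw [if_pos hm, if_pos ((pv_cond_iff pa pb d i).mpr hm)]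
    rfl
  · rw [if_neg hm, if_neg (by rw [pv_cond_iff pa pb d i]; exact hm)]
    rfl

theorem pv_keys_eq (pa pb : List String) :
    (pvDiag pa pb).keys = PySem.Set.ofList ((pvFlat pa pb).map (fun p => p.1)) := by
  rw [pv_diag_eq_fold, PySem.Dict.keys_foldl_modify_key, PySem.Set.ofList_eq_foldl]
  rfl

theorem pv_mem_keys (pa pb : List String) (d : Int) :
    d ∈ (pvDiag pa pb).keys ↔ pvMatch pa pb d ≠ [] := by
  rw [pv_keys_eq, PySem.Set.mem_ofList, ← pv_diag_getD pa pb d, pv_diag_getD_filter]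
  simp only [List.mem_map, ne_eq, List.map_eq_nil_iff, List.filter_eq_nil_iff, beq_iff_eq,
    not_forall]
  constructor
  · rintro ⟨p, hp, rfl⟩
    exact ⟨p, hp, by simp⟩
  · rintro ⟨p, hp, hd⟩
    exact ⟨p, hp, by simpa using hd⟩

theorem pv_nodup_keys (pa pb : List String) : ((pvDiag pa pb).keys).Nodup := by
  rw [pv_keys_eq]
  exact PySem.Set.nodup_ofList _

theorem pv_match_bounds (pa pb : List String) (d : Int) (h : pvMatch pa pb d ≠ []) :
    -((pa.length : Int) - 1) ≤ d ∧ d < (pb.length : Int) := by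
  rcases List.exists_mem_of_ne_nil _ h with ⟨x, hx⟩
  unfold pvMatch at hx
  rcases List.mem_map.mp hx with ⟨i, hi, rfl⟩
  rcases List.mem_filter.mp hi with ⟨hir, hc⟩
  have hila := List.mem_range.mp hir
  unfold pvCond at hc
  simp only [Bool.and_eq_true, decide_eq_true_eq] at hc
  omega

theorem pv_pyRange_pairwise (a b : Int) :
    (PySem.List.pyRange a b).Pairwise (fun x y => x < y) := by
  unfold PySem.List.pyRange
  rw [if_neg one_ne_zero]
  refine List.Pairwise.map _ (fun x y hxy => ?_) List.pairwise_lt_range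
  omega

theorem pv_sorted_keys (pa pb : List String) :
    PySem.List.sorted ((pvDiag pa pb).keys) (fun x => x) =
      (PySem.List.pyRange (-((pa.length : Int) - 1)) (pb.length : Int)).filter
        (fun x => decide (x ∈ (pvDiag pa pb).keys)) := by
  apply PySem.List.sorted_eq_of_perm_of_pairwise_lt
  · apply List.perm_of_nodup_nodup_toFinset_eq
    · exact ((pv_pyRange_pairwise _ _).filter _).imp (fun {a b} hab => ne_of_lt hab)
    · exact pv_nodup_keys pa pb
    · ext x
      simp only [List.mem_toFinset, List.mem_filter, PySem.List.mem_pyRange_one,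
        decide_eq_true_eq]
      constructor
      · rintro ⟨_, hx⟩; exact hx
      · intro hx
        have hb := pv_match_bounds pa pb x ((pv_mem_keys pa pb x).mp hx)
        exact ⟨⟨hb.1, hb.2⟩, hx⟩
  · exact (pv_pyRange_pairwise _ _).filter _

theorem pv_flush_run (d : Int) (r s : Int) (acc : List (Int × Int)) (h : r < s) :
    pvFlushA (pvRunInt d r s) acc = pvEmit d r (s - 1) acc := by
  unfold pvFlushA pvRunInt pvEmit
  rw [List.length_map, PySem.List.length_pyRange_one]
  by_cases hc : s - 1 > r
  · rw [if_pos (by omega), if_pos hc]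
    have hss : s - 1 + 1 = s := by ring
    rw [hss]
  · rw [if_neg (by omega), if_neg hc]

theorem pv_pyRange_singleton (a : Int) : PySem.List.pyRange a (a + 1) = [a] := by
  rw [PySem.List.pyRange_one_cons (by omega)]
  have hl : (PySem.List.pyRange (a + 1) (a + 1)).length = 0 := by
    rw [PySem.List.length_pyRange_one]; omega
  rw [List.eq_nil_of_length_eq_zero hl]

theorem pv_core12 (pa pb : List String) (d : Int) : ∀ (n : Nat),
    (∀ (s r : Nat) (acc : List (Int × Int)), r < s →
      pvOutA pa pb d n s (pvRunInt d (r : Int) (s : Int)) acc =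
        pvFin d ((pvSeg pa pb d s n).foldl (pvStepG d) ((r : Int), (s : Int) - 1, acc))) ∧
    (∀ (s : Nat) (st en : Int) (acc : List (Int × Int)), st ≤ en → en < (s : Int) - 1 →
      pvOutA pa pb d n s [] (pvEmit d st en acc) =
        pvFin d ((pvSeg pa pb d s n).foldl (pvStepG d) (st, en, acc))) := by
  intro n
  induction n with
  | zero =>
    constructor
    · intro s r acc hrs
      unfold pvOutA pvSeg pvFin
      simp only [List.range'_zero, List.filter_nil, List.map_nil, List.foldl_nil]
      exact pv_flush_run d (r : Int) (s : Int) acc (by exact_mod_cast hrs)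
    · intro s st en acc _ _
      unfold pvOutA pvSeg pvFin pvFlushA
      simp only [List.range'_zero, List.filter_nil, List.map_nil, List.foldl_nil,
        List.length_nil]
      rw [if_neg (by omega)]
  | succ n ih =>
    obtain ⟨ih1, ih2⟩ := ih
    constructor
    · intro s r acc hrs
      unfold pvOutA
      rw [List.range'_succ, List.foldl_cons]
      by_cases hw : (0 : Int) ≤ (s : Int) + d ∧ (s : Int) + d < (pb.length : Int)
      · by_cases he : pa.getD s "" = pb.getD ((s : Int) + d).toNat ""
        · have hstep : pvStepA pa pb d (pvRunInt d (r : Int) (s : Int), acc) s =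
              (pvRunInt d (r : Int) ((s + 1 : Nat) : Int), acc) := by
            unfold pvStepA
            rw [if_pos hw, if_pos he]
            unfold pvRunInt
            rw [show ((s + 1 : Nat) : Int) = (s : Int) + 1 by push_cast; ring,
              PySem.List.pyRange_one_succ_right (by exact_mod_cast hrs.le)]
            simp
          rw [hstep]
          have hcond : pvCond pa pb d s = true := by
            unfold pvCond; simp only [Bool.and_eq_true, decide_eq_true_eq, beq_iff_eq]
            exact ⟨hw, he⟩
          have hseg : pvSeg pa pb d s (n + 1) = (s : Int) :: pvSeg pa pb d (s + 1) n := by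
            unfold pvSeg; rw [List.range'_succ, List.filter_cons_of_pos hcond, List.map_cons]
          rw [hseg, List.foldl_cons]
          have hg : pvStepG d ((r : Int), (s : Int) - 1, acc) (s : Int) =
              ((r : Int), ((s + 1 : Nat) : Int) - 1, acc) := by
            unfold pvStepG
            rw [if_pos (by ring)]
            have : ((s + 1 : Nat) : Int) - 1 = (s : Int) := by push_cast; ring
            rw [this]
          rw [hg]
          exact ih1 (s + 1) r acc (by omega)
        · have hstep : pvStepA pa pb d (pvRunInt d (r : Int) (s : Int), acc) s =
              ([], pvEmit d (r : Int) ((s : Int) - 1) acc) := by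
            unfold pvStepA
            rw [if_pos hw, if_neg he]
            rw [show (pvRunInt d (r : Int) (s : Int), acc).1 = pvRunInt d (r : Int) (s : Int)
              from rfl]
            rw [pv_flush_run d (r : Int) (s : Int) acc (by exact_mod_cast hrs)]
          rw [hstep]
          have hcond : pvCond pa pb d s = false := by
            unfold pvCond
            simp
            intro _ _
            simpa using he
          have hseg : pvSeg pa pb d s (n + 1) = pvSeg pa pb d (s + 1) n := by
            unfold pvSeg; rw [List.range'_succ, List.filter_cons_of_neg (by simp [hcond])]
          rw [hseg]
          exact ih2 (s + 1) (r : Int) ((s : Int) - 1) acc (by omega) (by push_cast; omega)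
      · have hstep : pvStepA pa pb d (pvRunInt d (r : Int) (s : Int), acc) s =
            ([], pvEmit d (r : Int) ((s : Int) - 1) acc) := by
          unfold pvStepA
          rw [if_neg hw]
          rw [show (pvRunInt d (r : Int) (s : Int), acc).1 = pvRunInt d (r : Int) (s : Int)
            from rfl]
          rw [pv_flush_run d (r : Int) (s : Int) acc (by exact_mod_cast hrs)]
        rw [hstep]
        have hcond : pvCond pa pb d s = false := by
          unfold pvCond
          rw [decide_eq_false hw, Bool.false_and]
        have hseg : pvSeg pa pb d s (n + 1) = pvSeg pa pb d (s + 1) n := by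
          unfold pvSeg; rw [List.range'_succ, List.filter_cons_of_neg (by simp [hcond])]
        rw [hseg]
        exact ih2 (s + 1) (r : Int) ((s : Int) - 1) acc (by omega) (by push_cast; omega)
    · intro s st en acc h1 h2
      unfold pvOutA
      rw [List.range'_succ, List.foldl_cons]
      by_cases hw : (0 : Int) ≤ (s : Int) + d ∧ (s : Int) + d < (pb.length : Int)
      · by_cases he : pa.getD s "" = pb.getD ((s : Int) + d).toNat ""
        · have hstep : pvStepA pa pb d ([], pvEmit d st en acc) s =
              (pvRunInt d (s : Int) ((s + 1 : Nat) : Int), pvEmit d st en acc) := by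
            unfold pvStepA
            rw [if_pos hw, if_pos he]
            unfold pvRunInt
            rw [show ((s + 1 : Nat) : Int) = (s : Int) + 1 by push_cast; ring,
              pv_pyRange_singleton]
            simp
          rw [hstep]
          have hcond : pvCond pa pb d s = true := by
            unfold pvCond; simp only [Bool.and_eq_true, decide_eq_true_eq, beq_iff_eq]
            exact ⟨hw, he⟩
          have hseg : pvSeg pa pb d s (n + 1) = (s : Int) :: pvSeg pa pb d (s + 1) n := by
            unfold pvSeg; rw [List.range'_succ, List.filter_cons_of_pos hcond, List.map_cons]
          rw [hseg, List.foldl_cons]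
          have hg : pvStepG d (st, en, acc) (s : Int) =
              ((s : Int), ((s + 1 : Nat) : Int) - 1, pvEmit d st en acc) := by
            unfold pvStepG
            rw [if_neg (by simp only; omega)]
            have : ((s + 1 : Nat) : Int) - 1 = (s : Int) := by push_cast; ring
            rw [this]
          rw [hg]
          exact ih1 (s + 1) s (pvEmit d st en acc) (by omega)
        · have hstep : pvStepA pa pb d ([], pvEmit d st en acc) s =
              ([], pvEmit d st en acc) := by
            unfold pvStepA
            rw [if_pos hw, if_neg he]
            unfold pvFlushA
            simp
          rw [hstep]
          have hcond : pvCond pa pb d s = false := by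
            unfold pvCond
            simp
            intro _ _
            simpa using he
          have hseg : pvSeg pa pb d s (n + 1) = pvSeg pa pb d (s + 1) n := by
            unfold pvSeg; rw [List.range'_succ, List.filter_cons_of_neg (by simp [hcond])]
          rw [hseg]
          exact ih2 (s + 1) st en acc h1 (by push_cast at h2 ⊢; omega)
      · have hstep : pvStepA pa pb d ([], pvEmit d st en acc) s =
            ([], pvEmit d st en acc) := by
          unfold pvStepA
          rw [if_neg hw]
          unfold pvFlushA
          simp
        rw [hstep]
        have hcond : pvCond pa pb d s = false := by
          unfold pvCond
          rw [decide_eq_false hw, Bool.false_and]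
        have hseg : pvSeg pa pb d s (n + 1) = pvSeg pa pb d (s + 1) n := by
          unfold pvSeg; rw [List.range'_succ, List.filter_cons_of_neg (by simp [hcond])]
        rw [hseg]
        exact ih2 (s + 1) st en acc h1 (by push_cast at h2 ⊢; omega)

theorem pv_core0 (pa pb : List String) (d : Int) : ∀ (n s : Nat),
    pvOutA pa pb d n s [] [] = pvGroupB d (pvSeg pa pb d s n) := by
  intro n
  induction n with
  | zero =>
    intro s
    unfold pvOutA pvSeg pvGroupB pvFlushA
    simp
  | succ n ih =>
    intro s
    unfold pvOutA
    rw [List.range'_succ, List.foldl_cons]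
    by_cases hw : (0 : Int) ≤ (s : Int) + d ∧ (s : Int) + d < (pb.length : Int)
    · by_cases he : pa.getD s "" = pb.getD ((s : Int) + d).toNat ""
      · have hstep : pvStepA pa pb d ([], []) s =
            (pvRunInt d (s : Int) ((s + 1 : Nat) : Int), []) := by
          unfold pvStepA
          rw [if_pos hw, if_pos he]
          unfold pvRunInt
          rw [show ((s + 1 : Nat) : Int) = (s : Int) + 1 by push_cast; ring,
            pv_pyRange_singleton]
          simp
        rw [hstep]
        have hcond : pvCond pa pb d s = true := by
          unfold pvCond; simp only [Bool.and_eq_true, decide_eq_true_eq, beq_iff_eq]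
          exact ⟨hw, he⟩
        have hseg : pvSeg pa pb d s (n + 1) = (s : Int) :: pvSeg pa pb d (s + 1) n := by
          unfold pvSeg; rw [List.range'_succ, List.filter_cons_of_pos hcond, List.map_cons]
        rw [hseg]
        have hgb : pvGroupB d ((s : Int) :: pvSeg pa pb d (s + 1) n) =
            pvFin d ((pvSeg pa pb d (s + 1) n).foldl (pvStepG d) ((s : Int), (s : Int), [])) :=
          rfl
        rw [hgb]
        have h1 := (pv_core12 pa pb d n).1 (s + 1) s [] (by omega)
        unfold pvOutA at h1
        rw [show ((s + 1 : Nat) : Int) - 1 = (s : Int) by push_cast; ring] at h1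
        exact h1
      · have hstep : pvStepA pa pb d ([], []) s = ([], []) := by
          unfold pvStepA
          rw [if_pos hw, if_neg he]
          unfold pvFlushA
          simp
        rw [hstep]
        have hcond : pvCond pa pb d s = false := by
          unfold pvCond
          simp
          intro _ _
          simpa using he
        have hseg : pvSeg pa pb d s (n + 1) = pvSeg pa pb d (s + 1) n := by
          unfold pvSeg; rw [List.range'_succ, List.filter_cons_of_neg (by simp [hcond])]
        rw [hseg]
        exact ih (s + 1)
    · have hstep : pvStepA pa pb d ([], []) s = ([], []) := by
        unfold pvStepA
        rw [if_neg hw]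
        unfold pvFlushA
        simp
      rw [hstep]
      have hcond : pvCond pa pb d s = false := by
        unfold pvCond
        rw [decide_eq_false hw, Bool.false_and]
      have hseg : pvSeg pa pb d s (n + 1) = pvSeg pa pb d (s + 1) n := by
        unfold pvSeg; rw [List.range'_succ, List.filter_cons_of_neg (by simp [hcond])]
      rw [hseg]
      exact ih (s + 1)

theorem pv_innerA_eq (pa pb : List String) (d : Int) :
    pvInnerA pa pb d = pvGroupB d (pvMatch pa pb d) := by
  have h := pv_core0 pa pb d pa.length 0
  unfold pvOutA pvSeg at h
  unfold pvInnerA pvMatch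
  rw [List.range_eq_range']
  exact h

theorem pv_foldl_best_skip (m : Int → List (Int × Int)) (p : Int → Bool)
    (h : ∀ d, p d = false → m d = []) : ∀ (l : List Int) (init : List (Int × Int)),
    l.foldl (fun best d => if (m d).length > best.length then m d else best) init =
      (l.filter p).foldl (fun best d => if (m d).length > best.length then m d else best) init := by
  intro l
  induction l with
  | nil => intro init; simp
  | cons a t ih =>
    intro init
    rw [List.foldl_cons, List.filter_cons]
    by_cases hp : p a = true
    · rw [if_pos hp, List.foldl_cons]
      exact ih _
    · have hma : m a = [] := h a (Bool.eq_false_iff.mpr hp)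
      have hstep : (if (m a).length > init.length then m a else init) = init := by
        rw [hma]; simp
      rw [hstep, if_neg hp]
      exact ih init

-- ===== VERDICT (by name: the statement is the Claim_ definition above) =====
theorem find_consecutive_matches_spec : Claim_equal_find_consecutive_matches := by
  intro pa pb _
  unfold Spec_find_consecutive_matches find_consecutive_matches find_consecutive_matches_alt
  by_cases h : pa = [] ∨ pb = []
  · simp [h]
  · rw [if_neg h, if_neg h]
    have e1 : (PySem.List.pyRange (-((pa.length : Int) - 1)) (pb.length : Int)).foldl
        (fun best offset =>
          let m := pvInnerA pa pb offset
          if m.length > best.length then m else best) [] =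
      (PySem.List.pyRange (-((pa.length : Int) - 1)) (pb.length : Int)).foldl
        (fun best d =>
          if (pvGroupB d (pvMatch pa pb d)).length > best.length then
            pvGroupB d (pvMatch pa pb d)
          else best) [] :=
      PySem.List.foldl_congr_mem' _ _ _ _ (fun x _ acc => by simp only [pv_innerA_eq])
    rw [e1]
    rw [pv_foldl_best_skip (fun d => pvGroupB d (pvMatch pa pb d))
      (fun x => decide (x ∈ (pvDiag pa pb).keys))
      (fun d hd => by
        simp only [decide_eq_false_iff_not] at hd
        have hnil : pvMatch pa pb d = [] := not_not.mp (mt (pv_mem_keys pa pb d).mpr hd)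
        show pvGroupB d (pvMatch pa pb d) = []
        rw [hnil]
        rfl) _ _]
    rw [← pv_sorted_keys]
    exact (PySem.List.foldl_congr_mem' _ _ _ _ (fun x _ acc => by
      simp only [← PySem.Dict.getD_eq_get?_getD, pv_diag_getD])).symm
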